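-- pv_equiv track=rewrite | github.com/pypi-data/pypi-mirror-228 | packages/RepoDynamics/RepoDynamics-0.0.0.dev71-py3-none-any.whl/repodynamics/actions/init.py | process_changes_output
-- ===== SOURCE A (Python) =====
-- def process_changes_output(changes):
--     """
--
--     Parameters
--     ----------
--     changes
--
--     Returns
--     -------
--     The keys of the JSON dictionary are the groups that the files belong to,
--     defined in `.github/config/changed_files.yaml`. Another key is `all`, which is added as extra
--     (i.e. without being defined in the config file), which contains details on changes in the entire repository.
--     Each value is then a dictionary itself, as defined in the action's documentation.
--
--     Notes
--     -----
--     The boolean values in the output are given as strings, i.e. `true` and `false`.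
--
--     References
--     ----------
--     - https://github.com/marketplace/actions/changed-files
--     """
--     sep_groups = dict()
--     for item_name, val in changes.items():
--         group_name, attr = item_name.split("_", 1)
--         group = sep_groups.setdefault(group_name, dict())
--         group[attr] = val
--     for group_name, group_attrs in sep_groups.items():
--         sep_groups[group_name] = dict(sorted(group_attrs.items()))
--     return sep_groups
-- ===== SOURCE B (Python) =====
-- def process_changes_output(changes):
--     """Group changed-file entries by key prefix, one pass with ordered insertion:
--     each group's attribute list is kept sorted while it is built, so no sort or
--     second normalization loop is needed."""
--     sep_groups = {}
--     for item_name, val in changes.items():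
--         group_name, attr = item_name.split("_", 1)
--         attrs = sep_groups.setdefault(group_name, [])
--         for i, (a, _) in enumerate(attrs):
--             if a == attr:
--                 attrs[i] = (attr, val)
--                 break
--             if attr < a:
--                 attrs.insert(i, (attr, val))
--                 break
--         else:
--             attrs.append((attr, val))
--     return {g: dict(attrs) for g, attrs in sep_groups.items()}
-- ===== Notes on version B (the rewrite author's own statement) =====
-- stated objective: alternative
-- what changed: Replaces A's two-phase build-then-sort (group into nested dicts, then re-sort every group's items) by a single grouping pass that keeps each group's attribute list sorted via ordered insertion, with no sort call and no second normalization loop.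
import Mathlib
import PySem

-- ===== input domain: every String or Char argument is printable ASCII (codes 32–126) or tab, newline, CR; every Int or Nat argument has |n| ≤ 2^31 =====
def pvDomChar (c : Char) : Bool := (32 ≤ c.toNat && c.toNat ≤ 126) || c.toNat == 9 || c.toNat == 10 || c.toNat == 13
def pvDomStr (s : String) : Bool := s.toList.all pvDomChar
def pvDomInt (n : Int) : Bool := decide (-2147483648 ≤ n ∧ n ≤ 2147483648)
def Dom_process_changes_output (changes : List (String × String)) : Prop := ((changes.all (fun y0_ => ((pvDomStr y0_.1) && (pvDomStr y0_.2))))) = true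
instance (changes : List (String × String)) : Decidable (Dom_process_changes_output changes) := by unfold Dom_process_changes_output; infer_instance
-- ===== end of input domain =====

-- B replaces A's build-then-sort (group into dicts, then sort every group's items) by one
-- grouping pass that keeps each group's attribute list sorted via ordered insertion (objective: alternative).

-- ===== PORT A =====
-- 'group = sep_groups.setdefault(g, dict()); group[attr] = val' mutates the group held by
-- sep_groups, i.e. sep.insert g ((sep.getD g empty).insert attr val) (insert overwrites in place).
def pcoStepA (sep : PySem.Dict String (PySem.Dict String String)) (kv : String × String) :
    PySem.Dict String (PySem.Dict String String) :=
  match PySem.Str.splitMax? kv.1 "_" 1 with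
  | some [g, a] => sep.insert g ((sep.getD g PySem.Dict.empty).insert a kv.2)
  | _ => sep   -- split did not yield two pieces: Python raises ValueError here (outside Pre_)

def process_changes_output (changes : List (String × String)) : List (String × List (String × String)) :=
  let sep := changes.foldl pcoStepA PySem.Dict.empty
  -- second loop reassigns every existing key in place (key order kept), i.e. maps the values
  sep.items.map (fun p => (p.1, (PySem.Dict.ofList (PySem.List.sorted2 p.2.items Prod.fst Prod.snd)).items))

-- ===== PORT B =====
-- ordered insertion into the group's attribute list (B's inner for/else loop)
def insAttr (a v : String) : List (String × String) → List (String × String)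
  | [] => [(a, v)]
  | (a', v') :: rest =>
    if a' = a then (a, v) :: rest
    else if a < a' then (a, v) :: (a', v') :: rest
    else (a', v') :: insAttr a v rest

def pcoStepB (g : PySem.Dict String (List (String × String))) (kv : String × String) :
    PySem.Dict String (List (String × String)) :=
  match PySem.Str.splitMax? kv.1 "_" 1 with
  | some [gn, a] => g.insert gn (insAttr a kv.2 (g.getD gn []))
  | _ => g   -- ValueError in Python (outside Pre_)

def process_changes_output_alt (changes : List (String × String)) : List (String × List (String × String)) :=
  ((changes.foldl pcoStepB PySem.Dict.empty).items.map (fun p => (p.1, (PySem.Dict.ofList p.2).items)))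

-- ===== PRECONDITION & SPEC =====
-- Pre_ excludes exactly the inputs where some key has no underscore: there
-- 'group_name, attr = item_name.split("_", 1)' raises ValueError in A (and in B alike).
def Pre_process_changes_output (changes : List (String × String)) : Prop :=
  ∀ kv ∈ changes, PySem.Str.isIn "_" kv.1 = true
instance (changes : List (String × String)) : Decidable (Pre_process_changes_output changes) := by
  unfold Pre_process_changes_output; infer_instance

def pvWitness_process_changes_output : (List (String × String)) :=
  [("file_added", "true"), ("file_deleted", "false"), ("all_any", "true")]

def Spec_process_changes_output (changes : List (String × String)) (out : List (String × List (String × String))) : Prop := out = process_changes_output_alt changes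
instance (changes : List (String × String)) (out : List (String × List (String × String))) : Decidable (Spec_process_changes_output changes out) := by unfold Spec_process_changes_output; infer_instance

-- ===== CLAIM (what is proved, stated in full; the proofs are below) =====
def Claim_equal_process_changes_output : Prop := ∀ (changes : List (String × String)), Dom_process_changes_output changes → Pre_process_changes_output changes → Spec_process_changes_output changes (process_changes_output changes)

-- ===== LEMMAS AND PROOFS =====

theorem insAttr_mem (a v : String) (as : List (String × String)) (y : String × String)
    (h : y ∈ insAttr a v as) : y = (a, v) ∨ y ∈ as := by
  induction as with
  | nil => simp [insAttr] at h; simp [h]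
  | cons hd tl ih =>
    obtain ⟨a', v'⟩ := hd
    by_cases e1 : a' = a
    · simp only [insAttr, if_pos e1] at h
      rcases List.mem_cons.1 h with h' | h' <;> simp_all
    · by_cases e2 : a < a'
      · simp only [insAttr, if_neg e1, if_pos e2] at h
        rcases List.mem_cons.1 h with h' | h' <;> simp_all
      · simp only [insAttr, if_neg e1, if_neg e2] at h
        rcases List.mem_cons.1 h with h' | h'
        · simp [h']
        · rcases ih h' with h'' | h'' <;> simp [h'']

theorem insAttr_pairwise (a v : String) (as : List (String × String))
    (h : as.Pairwise (fun x y => x.1 < y.1)) :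
    (insAttr a v as).Pairwise (fun x y => x.1 < y.1) := by
  induction as with
  | nil => simp [insAttr]
  | cons hd tl ih =>
    obtain ⟨a', v'⟩ := hd
    rw [List.pairwise_cons] at h
    obtain ⟨h1, h2⟩ := h
    by_cases e1 : a' = a
    · rw [insAttr, if_pos e1]
      exact List.pairwise_cons.2 ⟨fun y hy => e1 ▸ h1 y hy, h2⟩
    · by_cases e2 : a < a'
      · rw [insAttr, if_neg e1, if_pos e2]
        refine List.pairwise_cons.2 ⟨?_, List.pairwise_cons.2 ⟨h1, h2⟩⟩
        intro y hy
        rcases List.mem_cons.1 hy with h' | hy'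
        · rw [h']; exact e2
        · exact lt_trans e2 (h1 y hy')
      · rw [insAttr, if_neg e1, if_neg e2]
        refine List.pairwise_cons.2 ⟨?_, ih h2⟩
        intro y hy
        rcases insAttr_mem a v tl y hy with rfl | hy'
        · exact lt_of_le_of_ne (not_lt.1 e2) e1
        · exact h1 y hy'

theorem insAttr_perm_not_mem (a v : String) (as : List (String × String))
    (h : ∀ p ∈ as, p.1 ≠ a) : (insAttr a v as).Perm ((a, v) :: as) := by
  induction as with
  | nil => simp [insAttr]
  | cons hd tl ih =>
    obtain ⟨a', v'⟩ := hd
    by_cases e1 : a' = a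
    · exact absurd e1 (h (a', v') (by simp))
    · by_cases e2 : a < a'
      · rw [insAttr, if_neg e1, if_pos e2]
      · rw [insAttr, if_neg e1, if_neg e2]
        exact ((ih (fun p hp => h p (by simp [hp]))).cons _).trans (List.Perm.swap _ _ _)

theorem insAttr_eq_map_of_mem (a v : String) (as : List (String × String))
    (hpw : as.Pairwise (fun x y => x.1 < y.1)) (hm : ∃ p ∈ as, p.1 = a) :
    insAttr a v as = as.map (fun p => if p.1 == a then (a, v) else p) := by
  induction as with
  | nil => simp at hm
  | cons hd tl ih =>
    obtain ⟨a', v'⟩ := hd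
    rw [List.pairwise_cons] at hpw
    obtain ⟨h1, h2⟩ := hpw
    by_cases e1 : a' = a
    · subst e1
      rw [insAttr, if_pos rfl, List.map_cons]
      simp only [beq_self_eq_true, if_true]
      congr 1
      conv_lhs => rw [← List.map_id tl]
      apply List.map_congr_left
      intro p hp
      have hlt : a' < p.1 := h1 p hp
      have : (p.1 == a') = false := beq_eq_false_iff_ne.2 (ne_of_gt hlt)
      simp [this]
    · by_cases e2 : a < a'
      · exfalso
        obtain ⟨p, hp, hpa⟩ := hm
        rcases List.mem_cons.1 hp with h' | hp'
        · exact e1 (by rw [h'] at hpa; simpa using hpa)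
        · have := h1 p hp'
          rw [hpa] at this
          exact absurd (lt_trans e2 this) (lt_irrefl a)
      · rw [insAttr, if_neg e1, if_neg e2, List.map_cons]
        have ne : (a' == a) = false := beq_eq_false_iff_ne.2 e1
        simp only [ne]
        rw [if_neg (by simp)]
        congr 1
        apply ih h2
        obtain ⟨p, hp, hpa⟩ := hm
        rcases List.mem_cons.1 hp with h' | hp'
        · exact absurd (by rw [h'] at hpa; simpa using hpa) e1
        · exact ⟨p, hp', hpa⟩

-- insertBy with two predicates that agree on the elements at hand
theorem insertBy_congr' {α : Type} (p q : α → α → Bool) (x : α) (ys : List α)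
    (h : ∀ b ∈ ys, p x b = q x b) :
    PySem.List.insertBy p x ys = PySem.List.insertBy q x ys := by
  induction ys with
  | nil => rfl
  | cons y ys ih =>
    rw [PySem.List.insertBy, PySem.List.insertBy]
    rw [h y (by simp)]
    by_cases hb : q x y = true
    · simp [hb]
    · simp only [Bool.not_eq_true] at hb
      simp [hb, ih (fun b hb' => h b (by simp [hb']))]

theorem foldl_insertBy_congr' {α : Type} (p q : α → α → Bool) (l : List α)
    (hpq : ∀ a ∈ l, ∀ b ∈ l, p a b = q a b) :
    ∀ (xs acc : List α), (∀ x ∈ xs, x ∈ l) → (∀ x ∈ acc, x ∈ l) →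
      xs.foldl (fun acc x => PySem.List.insertBy p x acc) acc
        = xs.foldl (fun acc x => PySem.List.insertBy q x acc) acc := by
  intro xs
  induction xs with
  | nil => intro acc _ _; rfl
  | cons x xs ih =>
    intro acc hxs hacc
    simp only [List.foldl_cons]
    rw [insertBy_congr' p q x acc (fun b hb => hpq x (hxs x (by simp)) b (hacc b hb))]
    exact ih _ (fun y hy => hxs y (by simp [hy]))
      (fun y hy => by
        rcases (PySem.List.insertBy_mem_iff q x y acc).1 hy with rfl | hy'
        · exact hxs y (by simp)
        · exact hacc y hy')

-- with distinct first components, Python's pair sort is the sort by first component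
theorem sorted2_eq_sorted_fst (xs : List (String × String))
    (hn : (xs.map Prod.fst).Nodup) :
    PySem.List.sorted2 xs Prod.fst Prod.snd = PySem.List.sorted xs Prod.fst := by
  have hinj : ∀ a ∈ xs, ∀ b ∈ xs, a.1 = b.1 → a = b := by
    intro a ha b hb hab
    exact List.inj_on_of_nodup_map hn ha hb hab
  rw [PySem.List.sorted2, PySem.List.sorted]
  simp only [if_neg (by simp : ¬ (false = true))]
  exact foldl_insertBy_congr' _ _ xs
    (by
      intro a ha b hb
      by_cases he : a.1 = b.1
      · have : a = b := hinj a ha b hb he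
        subst this
        simp
      · rcases lt_or_gt_of_ne he with hl | hl
        · simp [hl, not_lt.2 (le_of_lt hl)]
        · simp [not_lt.2 (le_of_lt hl), hl])
    xs [] (fun _ h => h) (by simp)

theorem sorted_fst_pairwise_lt (xs : List (String × String))
    (hn : (xs.map Prod.fst).Nodup) :
    (PySem.List.sorted xs Prod.fst).Pairwise (fun x y => x.1 < y.1) := by
  have hle := PySem.List.sorted_pairwise xs Prod.fst
  have hperm : (PySem.List.sorted xs Prod.fst).Perm xs := PySem.List.sorted_perm xs Prod.fst false
  have hn' : ((PySem.List.sorted xs Prod.fst).map Prod.fst).Nodup :=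
    (hperm.map Prod.fst).nodup_iff.2 hn
  have hne : (PySem.List.sorted xs Prod.fst).Pairwise (fun x y => x.1 ≠ y.1) :=
    (List.pairwise_map).1 hn'
  exact (hle.and hne).imp (fun h => lt_of_le_of_ne h.1 h.2)

-- sorting a group's items after an overwrite-insert = ordered insertion into the sorted items
theorem insAttr_sorted (d : PySem.Dict String String) (a v : String)
    (hn : d.keys.Nodup) :
    insAttr a v (PySem.List.sorted d.items Prod.fst)
      = PySem.List.sorted ((d.insert a v).items) Prod.fst := by
  have hnd : (d.items.map Prod.fst).Nodup := by
    have h' : d.keys = d.items.map Prod.fst := rfl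
    rwa [h'] at hn
  have hperm : (PySem.List.sorted d.items Prod.fst).Perm d.items :=
    PySem.List.sorted_perm d.items Prod.fst false
  have hpw := sorted_fst_pairwise_lt d.items hnd
  symm
  apply PySem.List.sorted_eq_of_perm_of_pairwise_lt
  · by_cases hc : d.contains a = true
    · rw [insAttr_eq_map_of_mem a v _ hpw ?hm]
      · rw [PySem.Dict.items_insert_of_contains _ _ hc]
        exact (hperm.map _)
      case hm =>
        have h1 : a ∈ d.keys := (PySem.Dict.contains_iff_mem_keys d a).1 hc
        have h2 : a ∈ d.items.map Prod.fst := h1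
        obtain ⟨p, hp, hpa⟩ := List.mem_map.1 h2
        exact ⟨p, hperm.mem_iff.2 hp, hpa⟩
    · have hc' : d.contains a = false := eq_false_of_ne_true hc
      rw [PySem.Dict.items_insert_of_not_contains _ _ hc']
      refine (insAttr_perm_not_mem a v _ ?_).trans ?_
      · intro p hp hpa
        apply hc
        apply (PySem.Dict.contains_iff_mem_keys d a).2
        show a ∈ d.items.map Prod.fst
        exact List.mem_map.2 ⟨p, hperm.mem_iff.1 hp, hpa⟩
      · exact ((hperm.cons _).trans (List.perm_append_singleton _ _).symm)
  · exact insAttr_pairwise a v _ hpw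

-- B's group value is always A's group dict with its items sorted by attribute
def pcoVF (d : PySem.Dict String String) : List (String × String) :=
  PySem.List.sorted d.items Prod.fst

def pcoF (p : String × PySem.Dict String String) : String × List (String × String) :=
  (p.1, pcoVF p.2)

theorem get?_mk_map (l : List (String × PySem.Dict String String)) (k : String) :
    (PySem.Dict.mk (l.map pcoF)).get? k = ((PySem.Dict.mk l).get? k).map pcoVF := by
  induction l with
  | nil => rfl
  | cons hd tl ih =>
    obtain ⟨k', d'⟩ := hd
    rw [List.map_cons]
    show (PySem.Dict.mk ((k', pcoVF d') :: tl.map pcoF)).get? k = _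
    rw [PySem.Dict.get?_mk_cons, PySem.Dict.get?_mk_cons]
    by_cases hk : k' = k
    · simp [hk]
    · simp only [beq_eq_false_iff_ne.2 hk, Bool.false_eq_true, if_false]
      exact ih

theorem get?_map_d (d : PySem.Dict String (PySem.Dict String String)) (k : String) :
    (PySem.Dict.mk (d.items.map pcoF)).get? k = (d.get? k).map pcoVF :=
  get?_mk_map d.items k

theorem insert_mk_map (l : List (String × PySem.Dict String String)) (k : String)
    (w : PySem.Dict String String) :
    (PySem.Dict.mk (l.map pcoF)).insert k (pcoVF w)
      = PySem.Dict.mk (((PySem.Dict.mk l).insert k w).items.map pcoF) := by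
  have hc : (PySem.Dict.mk (l.map pcoF)).contains k = (PySem.Dict.mk l).contains k := by
    rw [PySem.Dict.contains_mk, PySem.Dict.contains_mk]
    induction l with
    | nil => rfl
    | cons hd tl ih => simp [pcoF, ih]
  by_cases h : (PySem.Dict.mk l).contains k = true
  · apply PySem.Dict.ext
    rw [PySem.Dict.items_insert_of_contains _ _ (hc.trans h)]
    have hr := PySem.Dict.items_insert_of_contains (PySem.Dict.mk l) w h
    show _ = ((PySem.Dict.mk l).insert k w).items.map pcoF
    rw [hr]
    show (l.map pcoF).map (fun p => if p.1 == k then (k, pcoVF w) else p)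
        = (l.map (fun p => if p.1 == k then (k, w) else p)).map pcoF
    rw [List.map_map, List.map_map]
    apply List.map_congr_left
    intro p _
    by_cases hp : p.1 = k
    · simp [pcoF, hp]
    · simp [pcoF, hp]
  · have h' : (PySem.Dict.mk l).contains k = false := eq_false_of_ne_true h
    apply PySem.Dict.ext
    rw [PySem.Dict.items_insert_of_not_contains _ _ (hc.trans h')]
    have hr := PySem.Dict.items_insert_of_not_contains (PySem.Dict.mk l) w h'
    show _ = ((PySem.Dict.mk l).insert k w).items.map pcoF
    rw [hr]
    show (l.map pcoF) ++ [(k, pcoVF w)] = (l ++ [(k, w)]).map pcoF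
    simp [pcoF]

theorem insert_map_d (d : PySem.Dict String (PySem.Dict String String)) (k : String)
    (w : PySem.Dict String String) :
    (PySem.Dict.mk (d.items.map pcoF)).insert k (pcoVF w)
      = PySem.Dict.mk ((d.insert k w).items.map pcoF) :=
  insert_mk_map d.items k w

-- a key containing '_' splits into exactly two pieces
theorem go_zero (fuel : Nat) (l : List Char) (acc : List (List Char)) :
    PySem.Chars.splitOnMax.go ['_'] fuel 0 l [] acc = (l :: acc).reverse := by
  cases fuel with
  | zero => simp [PySem.Chars.splitOnMax.go]
  | succ n => cases l with
    | nil => simp [PySem.Chars.splitOnMax.go]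
    | cons c rest => simp [PySem.Chars.splitOnMax.go]

theorem go_one (fuel : Nat) : ∀ (l : List Char) (cur : List Char) (acc : List (List Char)),
    l.length < fuel → '_' ∈ l →
    ∃ x y, PySem.Chars.splitOnMax.go ['_'] fuel 1 l cur acc = acc.reverse ++ [x, y] := by
  induction fuel with
  | zero => intro l cur acc h; omega
  | succ n ih =>
    intro l cur acc hlen hmem
    cases l with
    | nil => simp at hmem
    | cons c rest =>
      by_cases hc : c = '_'
      · subst hc
        have hpre : List.isPrefixOf ['_'] ('_' :: rest) = true := by simp [List.isPrefixOf]
        refine ⟨cur.reverse, rest, ?_⟩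
        rw [PySem.Chars.splitOnMax.go]
        simp only [hpre, if_true, if_neg (by omega : ¬ (1:Nat) = 0)]
        show PySem.Chars.splitOnMax.go ['_'] n (1-1) (List.drop 1 ('_'::rest)) [] (cur.reverse :: acc) = _
        rw [go_zero]
        simp
      · have hpre : List.isPrefixOf ['_'] (c :: rest) = false := by
          simp [List.isPrefixOf, beq_eq_false_iff_ne.2 (fun e => hc e.symm)]
        have hmem' : '_' ∈ rest := by
          rcases List.mem_cons.1 hmem with h | h
          · exact absurd h.symm hc
          · exact h
        obtain ⟨x, y, hxy⟩ := ih rest (c :: cur) acc (by simp at hlen ⊢; omega) hmem'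
        refine ⟨x, y, ?_⟩
        rw [PySem.Chars.splitOnMax.go]
        simp only [hpre, Bool.false_eq_true, if_false, if_neg (by omega : ¬ (1:Nat) = 0)]
        exact hxy

theorem split_two (s : String) (h : PySem.Str.isIn "_" s = true) :
    ∃ g a, PySem.Str.splitMax? s "_" 1 = some [g, a] := by
  have hmem : '_' ∈ s.toList := by
    have h' : PySem.Chars.isIn "_".toList s.toList = true := by
      simpa [PySem.Str.isIn] using h
    have hinf := (PySem.Chars.isIn_iff_infix _ _).1 h'
    have he : "_".toList = ['_'] := by decide
    rw [he] at hinf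
    exact hinf.subset (by simp)
  obtain ⟨x, y, hxy⟩ := go_one (s.toList.length + 1) s.toList [] []
    (by omega) hmem
  refine ⟨String.ofList x, String.ofList y, ?_⟩
  rw [PySem.Str.splitMax?]
  have hsep : "_".toList = ['_'] := by decide
  rw [hsep]
  rw [PySem.Chars.splitMax?]
  rw [if_neg (by simp)]
  rw [PySem.Chars.splitOnMax]
  rw [if_neg (by omega)]
  show Option.map _ (some (PySem.Chars.splitOnMax.go ['_'] (s.toList.length + 1) (Int.toNat 1) s.toList [] [])) = _
  rw [show Int.toNat 1 = 1 from rfl, hxy]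
  simp

theorem stepA_keys_nodup (sep : PySem.Dict String (PySem.Dict String String))
    (kv : String × String) (h : sep.keys.Nodup) : (pcoStepA sep kv).keys.Nodup := by
  unfold pcoStepA
  rcases hsp : PySem.Str.splitMax? kv.1 "_" 1 with _ | ps
  · exact h
  · match ps with
    | [] => exact h
    | [g] => exact h
    | [g, a] => exact PySem.Dict.nodup_keys_insert _ _ _ h
    | g :: a :: c :: t => exact h

theorem stepA_inner_nodup (sep : PySem.Dict String (PySem.Dict String String))
    (kv : String × String)
    (h : ∀ k d, sep.get? k = some d → d.keys.Nodup) :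
    ∀ k d, (pcoStepA sep kv).get? k = some d → d.keys.Nodup := by
  unfold pcoStepA
  rcases hsp : PySem.Str.splitMax? kv.1 "_" 1 with _ | ps
  · exact h
  · match ps with
    | [] => exact h
    | [g] => exact h
    | [g, a] =>
      intro k d hd
      rw [PySem.Dict.get?_insert] at hd
      by_cases hk : k = g
      · rw [if_pos hk] at hd
        have hd' := Option.some.inj hd
        subst hd'
        apply PySem.Dict.nodup_keys_insert
        rw [PySem.Dict.getD_eq_get?_getD]
        rcases hg : sep.get? g with _ | d0
        · simpa using PySem.Dict.nodup_keys_empty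
        · simpa using h g d0 hg
      · rw [if_neg hk] at hd
        exact h k d hd
    | g :: a :: c :: t => exact h

theorem foldA_keys_nodup (changes : List (String × String)) :
    ∀ sepA : PySem.Dict String (PySem.Dict String String), sepA.keys.Nodup →
      (changes.foldl pcoStepA sepA).keys.Nodup := by
  induction changes with
  | nil => intro sepA h; exact h
  | cons kv rest ih => intro sepA h; exact ih _ (stepA_keys_nodup sepA kv h)

theorem foldA_inner_nodup (changes : List (String × String)) :
    ∀ sepA : PySem.Dict String (PySem.Dict String String),
      (∀ k d, sepA.get? k = some d → d.keys.Nodup) →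
      ∀ k d, (changes.foldl pcoStepA sepA).get? k = some d → d.keys.Nodup := by
  induction changes with
  | nil => intro sepA h; exact h
  | cons kv rest ih => intro sepA h; exact ih _ (stepA_inner_nodup sepA kv h)

theorem pco_main (changes : List (String × String)) :
    ∀ sepA : PySem.Dict String (PySem.Dict String String),
    Pre_process_changes_output changes →
    (∀ k d, sepA.get? k = some d → d.keys.Nodup) →
    changes.foldl pcoStepB (PySem.Dict.mk (sepA.items.map pcoF))
      = PySem.Dict.mk ((changes.foldl pcoStepA sepA).items.map pcoF) := by
  induction changes with
  | nil => intro sepA _ _; rfl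
  | cons kv rest ih =>
    intro sepA hpre hinner
    obtain ⟨g, a, hsp⟩ := split_two kv.1 (hpre kv (by simp))
    simp only [List.foldl_cons]
    have hdn : (sepA.getD g PySem.Dict.empty).keys.Nodup := by
      rw [PySem.Dict.getD_eq_get?_getD]
      rcases hg : sepA.get? g with _ | d0
      · simpa using PySem.Dict.nodup_keys_empty
      · simpa using hinner g d0 hg
    have hstep : pcoStepB (PySem.Dict.mk (sepA.items.map pcoF)) kv
        = PySem.Dict.mk ((pcoStepA sepA kv).items.map pcoF) := by
      unfold pcoStepA pcoStepB
      rw [hsp]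
      show (PySem.Dict.mk (sepA.items.map pcoF)).insert g
            (insAttr a kv.2 ((PySem.Dict.mk (sepA.items.map pcoF)).getD g []))
          = PySem.Dict.mk ((sepA.insert g ((sepA.getD g PySem.Dict.empty).insert a kv.2)).items.map pcoF)
      have hget : (PySem.Dict.mk (sepA.items.map pcoF)).getD g []
          = pcoVF (sepA.getD g PySem.Dict.empty) := by
        rw [PySem.Dict.getD_eq_get?_getD, get?_map_d, PySem.Dict.getD_eq_get?_getD]
        rcases hg : sepA.get? g with _ | d0
        · simp [pcoVF]
          rfl
        · simp
      rw [hget,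
        show pcoVF (sepA.getD g PySem.Dict.empty)
            = PySem.List.sorted (sepA.getD g PySem.Dict.empty).items Prod.fst from rfl,
        insAttr_sorted _ _ _ hdn]
      exact insert_map_d sepA g _
    rw [hstep]
    exact ih _ (fun p hp => hpre p (by simp [hp])) (stepA_inner_nodup sepA kv hinner)

-- ===== VERDICT (by name: the statement is the Claim_ definition above) =====
theorem process_changes_output_spec : Claim_equal_process_changes_output := by
  unfold Claim_equal_process_changes_output
  intro changes _ hpre
  unfold Spec_process_changes_output process_changes_output process_changes_output_alt
  have hmain := pco_main changes PySem.Dict.empty hpre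
      (by intro k d hd; rw [PySem.Dict.get?_empty] at hd; cases hd)
  have h0 : (PySem.Dict.empty : PySem.Dict String (List (String × String)))
      = PySem.Dict.mk (((PySem.Dict.empty : PySem.Dict String (PySem.Dict String String))).items.map pcoF) := rfl
  rw [h0, hmain]
  have hnd : (changes.foldl pcoStepA PySem.Dict.empty).keys.Nodup :=
    foldA_keys_nodup changes PySem.Dict.empty PySem.Dict.nodup_keys_empty
  have hinner := foldA_inner_nodup changes PySem.Dict.empty
      (by intro k d hd; rw [PySem.Dict.get?_empty] at hd; cases hd)
  show (changes.foldl pcoStepA PySem.Dict.empty).items.map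
        (fun p => (p.1, (PySem.Dict.ofList (PySem.List.sorted2 p.2.items Prod.fst Prod.snd)).items))
      = ((changes.foldl pcoStepA PySem.Dict.empty).items.map pcoF).map
        (fun p => (p.1, (PySem.Dict.ofList p.2).items))
  rw [List.map_map]
  apply List.map_congr_left
  intro p hp
  obtain ⟨g, d⟩ := p
  have hdn : d.keys.Nodup :=
    hinner g d (PySem.Dict.get?_of_mem_items _ hp hnd)
  have hdn' : (d.items.map Prod.fst).Nodup := hdn
  simp only [Function.comp, pcoF, pcoVF]
  rw [sorted2_eq_sorted_fst d.items hdn']
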